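-- pv_equiv track=rewrite | github.com/haskellman/Super-Labes-World | inventory.py | text_format
-- ===== SOURCE A (Python) =====
-- def text_format(text):
--     new_text = []
--     count = 0
--     for c in text:
--         count += 1
--         new_text.append(c)
--         if c == '\n':
--             count = 0
--         if count % 41 == 0:
--             new_text.append('\n')
--
--
--     return ''.join(new_text)
-- ===== SOURCE B (Python) =====
-- def text_format(text):
--     parts = []
--     for seg in text.split('\n'):
--         n = len(seg)
--         out = []
--         i = 0
--         while n - i > 41:
--             out.append(seg[i:i + 41] + '\n')
--             i += 41
--         out.append(seg[i:] + ('\n' if n - i == 41 else ''))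
--         parts.append(''.join(out))
--     return '\n\n'.join(parts)
-- ===== Notes on version B (the rewrite author's own statement) =====
-- stated objective: faster
-- what changed: Replaces the per-character counter loop with a split-on-newline plus 41-character slice chunking per segment, joining segments with doubled newlines.
import Mathlib
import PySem

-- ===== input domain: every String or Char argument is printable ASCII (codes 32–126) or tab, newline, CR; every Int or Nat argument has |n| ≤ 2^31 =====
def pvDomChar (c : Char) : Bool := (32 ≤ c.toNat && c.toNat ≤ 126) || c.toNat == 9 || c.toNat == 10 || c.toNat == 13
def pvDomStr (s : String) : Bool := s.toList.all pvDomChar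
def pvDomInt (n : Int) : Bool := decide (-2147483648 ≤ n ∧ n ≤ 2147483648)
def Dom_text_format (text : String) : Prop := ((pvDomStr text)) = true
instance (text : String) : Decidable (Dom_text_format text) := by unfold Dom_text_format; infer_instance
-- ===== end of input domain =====

-- B replaces A's per-character counter loop by split-on-'\n' + 41-char slice chunking per
-- segment (joined with doubled newlines); measurably faster in Python by a constant factor.

-- ===== PORT A =====
-- the body of A's 'for c in text' loop, acting on the state (new_text, count)
def tfStep (st : List Char × Int) (c : Char) : List Char × Int :=
  let count := st.2 + 1
  let new_text := st.1 ++ [c]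
  let count := if c = '\n' then 0 else count
  let new_text := if PySem.Int.mod count 41 = 0 then new_text ++ ['\n'] else new_text
  (new_text, count)

def text_format (text : String) : String :=
  String.ofList (text.toList.foldl tfStep ([], 0)).1

-- ===== PORT B =====
-- the 'while n - i > 41' loop of Source B, acting on (out, i)
def tfChunkLoop (seg : List Char) (n : Int) (out : List (List Char)) (i : Int) :
    List (List Char) × Int :=
  if 41 < n - i then
    tfChunkLoop seg n (out ++ [PySem.List.slice seg (some i) (some (i + 41)) ++ ['\n']]) (i + 41)
  else (out, i)
termination_by (n - i).toNat
decreasing_by omega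

def text_format_alt (text : String) : String :=
  let parts := (PySem.Chars.splitOn text.toList ['\n']).map (fun seg =>
    let n : Int := seg.length
    let oi := tfChunkLoop seg n [] 0
    PySem.Chars.join [] (oi.1 ++
      [PySem.List.slice seg (some oi.2) none ++ (if n - oi.2 = 41 then ['\n'] else [])]))
  String.ofList (PySem.Chars.join ['\n', '\n'] parts)

-- ===== PRECONDITION & SPEC =====
def Spec_text_format (text : String) (out : String) : Prop := out = text_format_alt text
instance (text : String) (out : String) : Decidable (Spec_text_format text out) := by unfold Spec_text_format; infer_instance

-- ===== CLAIM (what is proved, stated in full; the proofs are below) =====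
def Claim_equal_text_format : Prop := ∀ (text : String), Dom_text_format text → Spec_text_format text (text_format text)

-- ===== LEMMAS AND PROOFS =====

-- characterisation of A's loop output (count carried as a Nat)
def restA : List Char → Nat → List Char
  | [], _ => []
  | x :: xs, c =>
    if x = '\n' then x :: '\n' :: restA xs 0
    else x :: ((if (c + 1) % 41 = 0 then ['\n'] else []) ++ restA xs (c + 1))

-- final value of A's counter
def cntA : List Char → Nat → Nat
  | [], c => c
  | x :: xs, c => cntA xs (if x = '\n' then 0 else c + 1)

lemma foldA (cs : List Char) : ∀ (acc : List Char) (c : Nat),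
    cs.foldl tfStep (acc, (c : Int)) = (acc ++ restA cs c, (cntA cs c : Int)) := by
  induction cs with
  | nil => intro acc c; simp [restA, cntA]
  | cons x xs ih =>
    intro acc c
    by_cases hx : x = '\n'
    · have h0 : tfStep (acc, (c : Int)) x = (acc ++ [x] ++ ['\n'], ((0 : Nat) : Int)) := by
        simp [tfStep, hx, PySem.Int.mod]
      simp only [List.foldl_cons, h0, ih]
      simp [restA, cntA, hx]
    · by_cases hz : (c + 1) % 41 = 0
      · have hdvd : (41 : Int) ∣ ((c : Int) + 1) := by
          exact_mod_cast Nat.dvd_of_mod_eq_zero hz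
        have h0 : tfStep (acc, (c : Int)) x = (acc ++ [x] ++ ['\n'], (((c + 1 : Nat)) : Int)) := by
          simp [tfStep, hx, hdvd]
        simp only [List.foldl_cons, h0, ih]
        simp [restA, cntA, hx, hz]
      · have hndvd : ¬ (41 : Int) ∣ ((c : Int) + 1) := by
          intro h
          exact hz (Nat.eq_zero_of_dvd_of_lt (by exact_mod_cast h) |> fun _ => by
            have h' : (41 : Nat) ∣ c + 1 := by exact_mod_cast h
            exact Nat.mod_eq_zero_of_dvd h')
        have h0 : tfStep (acc, (c : Int)) x = (acc ++ [x], (((c + 1 : Nat)) : Int)) := by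
          simp [tfStep, hx, hndvd]
        simp only [List.foldl_cons, h0, ih]
        simp [restA, cntA, hx, hz]

lemma restA_mod : ∀ (cs : List Char) (a b : Nat), a % 41 = b % 41 → restA cs a = restA cs b := by
  intro cs
  induction cs with
  | nil => intro a b _; rfl
  | cons x xs ih =>
    intro a b hab
    by_cases hx : x = '\n'
    · simp [restA, hx]
    · have h1 : (a + 1) % 41 = (b + 1) % 41 := by omega
      simp [restA, hx, h1, ih (a + 1) (b + 1) h1]

-- chunking of a segment, the first block having 41 - c free slots (meaningful for c < 41)
def chunkC (c : Nat) (seg : List Char) : List Char :=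
  let k := 40 - c + 1
  if k < seg.length then seg.take k ++ '\n' :: chunkC 0 (seg.drop k)
  else seg ++ (if seg.length = k then ['\n'] else [])
termination_by seg.length
decreasing_by simp only [List.length_drop]; omega

lemma chunkC_nil (c : Nat) : chunkC c [] = [] := by
  rw [chunkC]; simp

lemma chunkC_cons_lt (c : Nat) (h : c < 40) (x : Char) (hs : List Char) :
    chunkC c (x :: hs) = x :: chunkC (c + 1) hs := by
  conv_lhs => rw [chunkC]
  conv_rhs => rw [chunkC]
  have hk : 40 - c + 1 = (40 - (c + 1) + 1) + 1 := by omega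
  rw [hk]
  simp only [List.length_cons, List.take_succ_cons, List.drop_succ_cons]
  split_ifs <;> first | (exfalso; omega) | simp

lemma chunkC_cons_40 (x : Char) (hs : List Char) :
    chunkC 40 (x :: hs) = x :: '\n' :: chunkC 0 hs := by
  rw [chunkC]
  simp only [show 40 - 40 + 1 = 1 by rfl, List.length_cons]
  by_cases hl : 0 < hs.length
  · have h1 : 1 < hs.length + 1 := by omega
    simp [h1]
  · have hnil : hs = [] := List.length_eq_zero_iff.mp (by omega)
    subst hnil
    simp [chunkC_nil]

-- left-to-right split on '\n' (Python str.split('\n')); always nonempty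
def mySplit : List Char → List (List Char)
  | [] => [[]]
  | x :: xs =>
    if x = '\n' then [] :: mySplit xs
    else match mySplit xs with
      | [] => [[x]]
      | h :: t => (x :: h) :: t

lemma mySplit_ne_nil (cs : List Char) : mySplit cs ≠ [] := by
  cases cs with
  | nil => simp [mySplit]
  | cons x xs =>
    simp only [mySplit]
    by_cases hx : x = '\n'
    · simp [hx]
    · simp only [hx]
      cases mySplit xs <;> simp

lemma splitOn_go_eq (fuel : Nat) : ∀ (l cur : List Char) (acc : List (List Char)),
    l.length ≤ fuel →
    PySem.Chars.splitOn.go ['\n'] fuel l cur acc =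
      acc.reverse ++ (match mySplit l with
        | [] => []
        | h :: t => (cur.reverse ++ h) :: t) := by
  induction fuel with
  | zero =>
    intro l cur acc hl
    have : l = [] := List.length_eq_zero_iff.mp (by omega)
    subst this
    simp [PySem.Chars.splitOn.go, mySplit]
  | succ f ih =>
    intro l cur acc hl
    cases l with
    | nil => simp [PySem.Chars.splitOn.go, mySplit]
    | cons c rest =>
      by_cases hc : c = '\n'
      · have hpre : ['\n'].isPrefixOf (c :: rest) = true := by
          simp [List.isPrefixOf, hc]
        simp only [PySem.Chars.splitOn.go, hpre, if_true]
        rw [ih _ _ _ (by simpa using Nat.le_of_succ_le_succ hl)]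
        rcases hsp : mySplit rest with _ | ⟨h, t⟩
        · exact absurd hsp (mySplit_ne_nil rest)
        · simp [mySplit, hc, hsp]
      · have hpre : ['\n'].isPrefixOf (c :: rest) = false := by
          simp only [List.isPrefixOf, Bool.and_true,
            beq_eq_false_iff_ne, ne_eq]
          intro h; exact hc h.symm
        simp only [PySem.Chars.splitOn.go, hpre, Bool.false_eq_true, if_false]
        rw [ih _ _ _ (by simpa using Nat.le_of_succ_le_succ hl)]
        rcases hsp : mySplit rest with _ | ⟨h, t⟩
        · exact absurd hsp (mySplit_ne_nil rest)
        · simp [mySplit, hc, hsp]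

lemma splitOn_eq (cs : List Char) : PySem.Chars.splitOn cs ['\n'] = mySplit cs := by
  unfold PySem.Chars.splitOn
  rw [splitOn_go_eq _ _ _ _ (by omega)]
  rcases hsp : mySplit cs with _ | ⟨h, t⟩
  · exact absurd hsp (mySplit_ne_nil cs)
  · simp

lemma join_nil_sep (ps : List (List Char)) : PySem.Chars.join [] ps = ps.flatten := by
  induction ps with
  | nil => simp [PySem.Chars.join_nil]
  | cons p q ih =>
    cases q with
    | nil => simp [PySem.Chars.join_singleton]
    | cons r s => simp [PySem.Chars.join_cons_cons] at ih ⊢; simp [ih]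

lemma tfTerminal (seg : List Char) (i : Int) (out : List (List Char)) (hi : 0 ≤ i)
    (h : ¬ 41 < (seg.length : Int) - i) :
    PySem.Chars.join [] (out ++
      [PySem.List.slice seg (some i) none ++
        (if (seg.length : Int) - i = 41 then ['\n'] else [])])
    = PySem.Chars.join [] out ++ chunkC 0 (seg.drop i.toNat) := by
  rw [PySem.List.slice_from seg hi]
  conv_rhs => rw [chunkC]
  by_cases hc : (seg.length : Int) - i = 41
  · have h1 : seg.length - i.toNat = 41 := by omega
    simp [hc, h1, join_nil_sep]
  · have h1 : ¬ (seg.length - i.toNat = 41) := by omega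
    have h2 : ¬ (41 < seg.length - i.toNat) := by omega
    simp [hc, h1, h2, join_nil_sep]

lemma tfChunkLoop_eq (seg : List Char) : ∀ (k : Nat) (i : Int) (out : List (List Char)),
    0 ≤ i → (((seg.length : Int) - i).toNat ≤ k) →
    PySem.Chars.join [] ((tfChunkLoop seg (seg.length : Int) out i).1 ++
      [PySem.List.slice seg (some (tfChunkLoop seg (seg.length : Int) out i).2) none ++
        (if (seg.length : Int) - (tfChunkLoop seg (seg.length : Int) out i).2 = 41
         then ['\n'] else [])])
    = PySem.Chars.join [] out ++ chunkC 0 (seg.drop i.toNat) := by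
  intro k
  induction k with
  | zero =>
    intro i out hi hk
    have hno : ¬ 41 < (seg.length : Int) - i := by omega
    have hstep : tfChunkLoop seg (seg.length : Int) out i = (out, i) := by
      rw [tfChunkLoop, if_neg hno]
    rw [hstep]
    exact tfTerminal seg i out hi hno
  | succ m ih =>
    intro i out hi hk
    by_cases h : 41 < (seg.length : Int) - i
    · have hstep : tfChunkLoop seg (seg.length : Int) out i =
          tfChunkLoop seg (seg.length : Int)
            (out ++ [PySem.List.slice seg (some i) (some (i + 41)) ++ ['\n']]) (i + 41) := by
        rw [tfChunkLoop, if_pos h]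
      rw [hstep, ih (i + 41) _ (by omega) (by omega)]
      have hslice : PySem.List.slice seg (some i) (some (i + 41)) =
          (seg.drop i.toNat).take 41 := by
        rw [PySem.List.slice_toNat seg hi (by omega)]
        congr 1
        omega
      have hch : chunkC 0 (seg.drop i.toNat) = (seg.drop i.toNat).take 41 ++
          '\n' :: chunkC 0 (seg.drop (i + 41).toNat) := by
        conv_lhs => rw [chunkC]
        have hlt : 40 - 0 + 1 < (seg.drop i.toNat).length := by
          simp only [List.length_drop]; omega
        simp only [hlt, if_pos]
        have hdd : (seg.drop i.toNat).drop (40 - 0 + 1) = seg.drop (i + 41).toNat := by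
          rw [List.drop_drop]
          congr 1
          omega
        rw [hdd]
      rw [hch, hslice]
      simp [join_nil_sep]
    · have hstep : tfChunkLoop seg (seg.length : Int) out i = (out, i) := by
        rw [tfChunkLoop, if_neg h]
      rw [hstep]
      exact tfTerminal seg i out hi h

lemma join_cons_append (sep p pre : List Char) (ps : List (List Char)) :
    PySem.Chars.join sep ((pre ++ p) :: ps) = pre ++ PySem.Chars.join sep (p :: ps) := by
  cases ps with
  | nil => simp [PySem.Chars.join_singleton]
  | cons q qs => simp [PySem.Chars.join_cons_cons]

-- join of the chunked segments, the first block of the first segment partially used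
def joinJ (c : Nat) (parts : List (List Char)) : List Char :=
  match parts with
  | [] => []
  | h :: t => PySem.Chars.join ['\n', '\n'] (chunkC c h :: t.map (chunkC 0))

lemma joinJ_eq_restA : ∀ (cs : List Char) (c : Nat), c < 41 →
    joinJ c (mySplit cs) = restA cs c := by
  intro cs
  induction cs with
  | nil =>
    intro c hc
    simp only [mySplit, joinJ, List.map_nil, PySem.Chars.join_singleton]
    rw [chunkC_nil]; rfl
  | cons x xs ih =>
    intro c hc
    by_cases hx : x = '\n'
    · rcases hsp : mySplit xs with _ | ⟨h, t⟩
      · exact absurd hsp (mySplit_ne_nil xs)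
      · have ih0 := ih 0 (by omega)
        rw [hsp] at ih0
        simp only [joinJ] at ih0
        simp only [mySplit, hx, if_true, hsp, joinJ, List.map_cons,
          PySem.Chars.join_cons_cons, chunkC_nil, List.nil_append]
        simp [restA, ih0]
    · rcases hsp : mySplit xs with _ | ⟨h, t⟩
      · exact absurd hsp (mySplit_ne_nil xs)
      · have hms : mySplit (x :: xs) = (x :: h) :: t := by
          simp [mySplit, hx, hsp]
        rw [hms]
        by_cases h40 : c = 40
        · subst h40
          have ih0 := ih 0 (by omega)
          rw [hsp] at ih0
          simp only [joinJ] at ih0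
          simp only [joinJ, chunkC_cons_40]
          rw [show (x :: '\n' :: chunkC 0 h) = [x, '\n'] ++ chunkC 0 h from rfl,
            join_cons_append]
          have hr : restA (x :: xs) 40 = x :: '\n' :: restA xs 0 := by
            have h41 : restA xs 41 = restA xs 0 := restA_mod xs 41 0 (by norm_num)
            simp [restA, hx, h41]
          rw [hr, ih0]
          rfl
        · have hlt : c < 40 := by omega
          have hmod : (c + 1) % 41 = c + 1 := Nat.mod_eq_of_lt (by omega)
          have ihc := ih (c + 1) (by omega)
          rw [hsp] at ihc
          simp only [joinJ] at ihc
          simp only [joinJ, chunkC_cons_lt c hlt]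
          rw [show (x :: chunkC (c + 1) h) = [x] ++ chunkC (c + 1) h from rfl,
            join_cons_append]
          rw [ihc]
          simp [restA, hx, hmod]

-- ===== VERDICT (by name: the statement is the Claim_ definition above) =====
theorem text_format_spec : Claim_equal_text_format := by
  intro text _
  unfold Spec_text_format text_format text_format_alt
  have hA := foldA text.toList [] 0
  simp only [Nat.cast_zero, List.nil_append] at hA
  rw [hA]
  simp only [splitOn_eq]
  have hf : ((mySplit text.toList).map (fun seg =>
      let n : Int := seg.length
      let oi := tfChunkLoop seg n [] 0
      PySem.Chars.join [] (oi.1 ++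
        [PySem.List.slice seg (some oi.2) none ++ (if n - oi.2 = 41 then ['\n'] else [])])))
      = (mySplit text.toList).map (chunkC 0) := by
    apply List.map_congr_left
    intro seg _
    have := tfChunkLoop_eq seg ((seg.length : Int) - 0).toNat 0 [] (by omega) (by omega)
    simpa [PySem.Chars.join_nil] using this
  rw [hf]
  have hj := joinJ_eq_restA text.toList 0 (by omega)
  rcases hsp : mySplit text.toList with _ | ⟨h, t⟩
  · exact absurd hsp (mySplit_ne_nil _)
  · rw [hsp] at hj
    simp only [joinJ] at hj
    simp only [List.map_cons]
    rw [hj]
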